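-- pv_equiv track=rewrite | github.com/SSKYAJI/ACG | acg/localization/scip_parse.py | _symbol_name
-- ===== SOURCE A (Python) =====
-- def _symbol_name(symbol: str) -> str:
--     stripped = symbol.rstrip(" .#/")
--     if not stripped:
--         return symbol
--     for separator in ("#", ".", "/", " "):
--         if separator in stripped:
--             stripped = stripped.rsplit(separator, 1)[-1]
--     return stripped or symbol
-- ===== SOURCE B (Python) =====
-- def _symbol_name(symbol: str) -> str:
--     # One backward scan: the last segment is the longest separator-free suffix
--     # of the rstripped symbol.
--     stripped = symbol.rstrip(" .#/")
--     if not stripped: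
--         return symbol
--     tail = []
--     for ch in reversed(stripped):
--         if ch in " .#/":
--             break
--         tail.append(ch)
--     tail.reverse()
--     return "".join(tail)
-- ===== Notes on version B (the rewrite author's own statement) =====
-- stated objective: simpler
-- what changed: Replaces the four sequential membership-tested rsplit passes with a single backward scan that collects the longest separator-free suffix of the rstripped symbol.
import Mathlib
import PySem

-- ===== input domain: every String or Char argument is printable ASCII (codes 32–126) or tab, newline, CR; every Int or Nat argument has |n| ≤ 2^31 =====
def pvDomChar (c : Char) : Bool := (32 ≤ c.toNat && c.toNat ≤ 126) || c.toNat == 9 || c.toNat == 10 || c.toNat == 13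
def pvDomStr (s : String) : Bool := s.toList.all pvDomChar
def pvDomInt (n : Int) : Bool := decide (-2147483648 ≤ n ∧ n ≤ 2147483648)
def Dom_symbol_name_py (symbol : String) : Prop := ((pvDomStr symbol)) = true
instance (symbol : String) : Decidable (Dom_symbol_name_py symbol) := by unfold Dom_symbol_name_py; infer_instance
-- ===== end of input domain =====

-- B replaces A's four sequential membership-tested rsplit passes by a single backward
-- scan collecting the longest separator-free suffix of the rstripped symbol (simpler).

-- ===== PORT A =====
-- one of the four separator characters " .#/"
def pvSep (c : Char) : Bool := c == ' ' || c == '.' || c == '#' || c == '/'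

-- symbol.rstrip(" .#/"): drop separator chars from the right (exact: rstrip with an
-- explicit char set removes exactly the trailing chars belonging to the set)
def pvRstrip (l : List Char) : List Char := (l.reverse.dropWhile pvSep).reverse

-- stripped.rsplit(sep, 1)[-1] for a single-char sep that occurs in stripped:
-- the part after the LAST occurrence of sep (exact for a 1-char separator)
def pvRsplitLast (c : Char) (l : List Char) : List Char :=
  (l.reverse.takeWhile (fun d => d ≠ c)).reverse

def symbol_name_py (symbol : String) : String :=
  let stripped := pvRstrip symbol.toList
  if stripped = [] then symbol
  else
    -- for separator in ("#", ".", "/", " "): if separator in stripped: stripped = stripped.rsplit(separator, 1)[-1]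
    -- ('sep in stripped' for a 1-char needle is exactly list membership)
    let s1 := if '#' ∈ stripped then pvRsplitLast '#' stripped else stripped
    let s2 := if '.' ∈ s1 then pvRsplitLast '.' s1 else s1
    let s3 := if '/' ∈ s2 then pvRsplitLast '/' s2 else s2
    let s4 := if ' ' ∈ s3 then pvRsplitLast ' ' s3 else s3
    if s4 = [] then symbol else String.ofList s4

-- ===== PORT B =====
def symbol_name_py_alt (symbol : String) : String :=
  let stripped := pvRstrip symbol.toList
  if stripped = [] then symbol
  else
    -- the for-ch-in-reversed(stripped) loop appending until a separator, then
    -- reversed and joined, is exactly takeWhile over the reversed list, reversed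
    String.ofList (stripped.reverse.takeWhile (fun c => !pvSep c)).reverse

-- ===== PRECONDITION & SPEC =====
def Spec_symbol_name_py (symbol : String) (out : String) : Prop := out = symbol_name_py_alt symbol
instance (symbol : String) (out : String) : Decidable (Spec_symbol_name_py symbol out) := by unfold Spec_symbol_name_py; infer_instance

-- ===== CLAIM (what is proved, stated in full; the proofs are below) =====
def Claim_equal_symbol_name_py : Prop := ∀ (symbol : String), Dom_symbol_name_py symbol → Spec_symbol_name_py symbol (symbol_name_py symbol)

-- ===== LEMMAS AND PROOFS =====

-- A's single pass, seen from the right end of the string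
def pvStep (c : Char) (r : List Char) : List Char :=
  if c ∈ r then r.takeWhile (fun d => d ≠ c) else r

lemma pvStep_reverse (c : Char) (m : List Char) :
    (if c ∈ m then pvRsplitLast c m else m) = (pvStep c m.reverse).reverse := by
  simp [pvStep, pvRsplitLast]
  split_ifs <;> simp

lemma pvStep_nil (c : Char) : pvStep c [] = [] := by simp [pvStep]

lemma pvStep_cons_ne (c d : Char) (r : List Char) (h : d ≠ c) :
    pvStep c (d :: r) = d :: pvStep c r := by
  have hcd : ¬ c = d := fun e => h e.symm
  unfold pvStep
  by_cases hc : c ∈ r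
  · rw [if_pos (List.mem_cons.mpr (Or.inr hc)), if_pos hc, List.takeWhile_cons]
    simp [h]
  · rw [if_neg (by simp [hcd, hc]), if_neg hc]

lemma pvStep_cons_self (c : Char) (r : List Char) :
    pvStep c (c :: r) = [] := by
  simp [pvStep]

-- the chain of the four steps computes takeWhile (not separator)
lemma pvChain_eq_takeWhile (r : List Char) :
    pvStep ' ' (pvStep '/' (pvStep '.' (pvStep '#' r)))
      = r.takeWhile (fun c => !pvSep c) := by
  induction r with
  | nil => simp [pvStep_nil]
  | cons d r ih =>
    by_cases h : pvSep d = true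
    · rcases (by simpa [pvSep] using h : ((d = ' ' ∨ d = '.') ∨ d = '#') ∨ d = '/') with ((h | h) | h) | h
      all_goals subst h
      all_goals simp [pvStep_cons_self, pvStep_cons_ne, pvStep_nil, pvSep]
    · have h1 : d ≠ '#' := by rintro rfl; simp [pvSep] at h
      have h2 : d ≠ '.' := by rintro rfl; simp [pvSep] at h
      have h3 : d ≠ '/' := by rintro rfl; simp [pvSep] at h
      have h4 : d ≠ ' ' := by rintro rfl; simp [pvSep] at h
      rw [pvStep_cons_ne _ _ _ h1, pvStep_cons_ne _ _ _ h2, pvStep_cons_ne _ _ _ h3,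
        pvStep_cons_ne _ _ _ h4, ih, List.takeWhile_cons]
      simp [h]

-- the rstripped string does not end in a separator, so the collected suffix is nonempty
lemma pvTakeWhile_rstrip_ne_nil (l : List Char) (h : pvRstrip l ≠ []) :
    ((pvRstrip l).reverse.takeWhile (fun c => !pvSep c)) ≠ [] := by
  unfold pvRstrip at *
  rcases hr : l.reverse.dropWhile pvSep with _ | ⟨d, r⟩
  · simp [hr] at h
  · have hd : pvSep d = false := by
      have := List.head_dropWhile_not pvSep (l := l.reverse) (by simp [hr])
      simpa [hr] using this
    simp [hd]

-- ===== VERDICT (by name: the statement is the Claim_ definition above) =====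
theorem symbol_name_py_spec : Claim_equal_symbol_name_py := by
  intro symbol _
  unfold Spec_symbol_name_py symbol_name_py symbol_name_py_alt
  set stripped := pvRstrip symbol.toList with hs
  by_cases hnil : stripped = []
  · simp [hnil]
  · simp only [hnil, if_false]
    rw [pvStep_reverse '#', pvStep_reverse '.', pvStep_reverse '/', pvStep_reverse ' ']
    simp only [List.reverse_reverse]
    rw [pvChain_eq_takeWhile]
    have hne := pvTakeWhile_rstrip_ne_nil symbol.toList (hs ▸ hnil)
    rw [← hs] at hne
    simp [hne]
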